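-- pv_equiv track=rewrite | github.com/GodOrGovern/Project_Euler | problems/Python/e051.py | prime_fams
-- ===== SOURCE A (Python) =====
-- def prime_fams(num):
--     ''' Generate prime families that num belongs to '''
--     num = str(num)
--     fams = ['x', num[0]]
--     for n in num[1:-1]:
--         cur_fams = []
--         for f in fams:
--             if 'x' in f:
--                 index = f.index('x')
--                 if num[index] == n:
--                     cur_fams.append(f+'x')
--             else:
--                 cur_fams.append(f+'x')
--             cur_fams.append(f+n)
--         fams = cur_fams
--     if len(num) > 1:
--         return [f+num[-1] for f in fams[:-1]]
--     return fams[0]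
-- ===== SOURCE B (Python) =====
-- def prime_fams(num):
--     ''' Generate prime families that num belongs to '''
--     s = str(num)
--     m = len(s) - 1
--     if m == 0:
--         return 'x'
--     out = []
--     # enumerate mask values: position 0 is the most-significant bit, bit 0 = masked;
--     # the all-literal value 2**m - 1 is excluded by the range
--     for v in range(2 ** m - 1):
--         masked = [i for i in range(m) if v // 2 ** (m - 1 - i) % 2 == 0]
--         d = s[masked[0]]
--         if all(s[i] == d for i in masked):
--             out.append(''.join('x' if i in masked else s[i] for i in range(m)) + s[-1])
--     return out
-- ===== Notes on version B (the rewrite author's own statement) =====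
-- stated objective: alternative
-- what changed: A grows the family list breadth-first, doubling it digit by digit with an index-of-'x' scan to prune; B instead enumerates the bitmask values 0..2^(L-1)-2 directly, decodes each mask into masked positions, and keeps the pattern iff all masked digits agree, producing the same list in the same order.
-- outside the precondition, e.g. on prime_fams(5): A returns 'x', B returns 'x'
import Mathlib
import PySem

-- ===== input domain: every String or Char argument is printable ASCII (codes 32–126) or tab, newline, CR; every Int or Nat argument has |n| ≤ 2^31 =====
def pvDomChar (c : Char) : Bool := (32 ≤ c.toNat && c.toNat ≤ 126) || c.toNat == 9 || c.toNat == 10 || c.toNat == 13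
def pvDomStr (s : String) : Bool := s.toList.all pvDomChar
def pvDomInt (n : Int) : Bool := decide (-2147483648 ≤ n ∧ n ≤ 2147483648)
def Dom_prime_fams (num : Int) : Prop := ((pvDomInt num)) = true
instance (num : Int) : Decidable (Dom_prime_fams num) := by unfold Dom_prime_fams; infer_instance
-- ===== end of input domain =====

-- B replaces A's breadth-first list-doubling generation of wildcard patterns by a single
-- enumeration of bitmask values decoded into patterns (alternative decomposition, same cost class).

-- ===== PORT A =====
def prime_fams (num : Int) : List String :=
  let s := PySem.Int.toChars num
  let fams : List (List Char) :=
    (PySem.List.slice s (some 1) (some (-1))).foldl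
      (fun fams n =>
        fams.foldl
          (fun cur f =>
            (if f.contains 'x' then
              -- f.index('x'): guarded by `'x' in f`, so the `none` arm is unreachable
              match PySem.List.index? f 'x' with
              | some index => if PySem.List.pyGetD s (index : Int) ' ' = n then cur ++ [f ++ ['x']] else cur
              | none => cur
            else cur ++ [f ++ ['x']]) ++ [f ++ [n]])
          [])
      [['x'], [PySem.List.pyGetD s 0 ' ']]
  if 1 < s.length then
    (PySem.List.slice fams none (some (-1))).map
      (fun f => String.ofList (f ++ [PySem.List.pyGetD s (-1) ' ']))
  else
    -- Python returns the bare string fams[0] here (not a list of strings): outside Pre_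
    [String.ofList (fams.headD [])]

-- ===== PORT B =====
def prime_fams_alt (num : Int) : List String :=
  let s := PySem.Int.toChars num
  let m := s.length - 1
  if m = 0 then
    -- Python returns the bare string 'x' here (not a list of strings): outside Pre_
    ["x"]
  else
    (PySem.List.pyRange 0 ((2:Int) ^ m - 1) 1).foldl
      (fun out v =>
        -- range(m) ported with Nat indices i (exact: 0 ≤ i < m)
        let masked := (List.range m).filter
          (fun i => PySem.Int.mod (PySem.Int.floordiv v ((2:Int) ^ (m - 1 - i))) 2 == 0)
        let d := PySem.List.pyGetD s ((masked.headD 0 : Nat) : Int) ' '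
        if masked.all (fun i => PySem.List.pyGetD s ((i : Nat) : Int) ' ' == d) then
          out ++ [String.ofList
            (((List.range m).map (fun i =>
               if masked.contains i then 'x' else PySem.List.pyGetD s ((i : Nat) : Int) ' '))
             ++ [PySem.List.pyGetD s (-1) ' '])]
        else out)
      []

-- ===== PRECONDITION & SPEC =====
-- Pre_ excludes single-digit non-negative inputs (0..9), on which Python A returns the bare
-- string 'x' instead of a list of strings (a value outside the declared return type list[str]).
def Pre_prime_fams (num : Int) : Prop := num < 0 ∨ 10 ≤ num
instance (num : Int) : Decidable (Pre_prime_fams num) := by unfold Pre_prime_fams; infer_instance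
def pvWitness_prime_fams : Int := (13)

def Spec_prime_fams (num : Int) (out : List String) : Prop := out = prime_fams_alt num
instance (num : Int) (out : List String) : Decidable (Spec_prime_fams num out) := by unfold Spec_prime_fams; infer_instance

-- ===== CLAIM (what is proved, stated in full; the proofs are below) =====
def Claim_equal_prime_fams : Prop := ∀ (num : Int), Dom_prime_fams num → Pre_prime_fams num → Spec_prime_fams num (prime_fams num)

-- ===== LEMMAS AND PROOFS =====

-- bit i (position i, MSB first) of the m-bit value v; 0 = masked position
def pfBit (m v i : Nat) : Nat := v / 2 ^ (m - 1 - i) % 2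
def pfMasked (m v : Nat) : List Nat := (List.range m).filter (fun i => pfBit m v i == 0)
def pfOk (s : List Char) (m v : Nat) : Bool :=
  (pfMasked m v).all (fun i => s.getD i ' ' == s.getD ((pfMasked m v).headD 0) ' ')
def pfPatt (s : List Char) (m v : Nat) : List Char :=
  (List.range m).map (fun i => if pfBit m v i == 0 then 'x' else s.getD i ' ')
def pfForm (s : List Char) (m : Nat) : List (List Char) :=
  ((List.range (2 ^ m)).filter (pfOk s m)).map (pfPatt s m)

-- A's inner loop over the current family list, with current digit n
def pfStep (s : List Char) (fams : List (List Char)) (n : Char) : List (List Char) :=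
  fams.foldl
    (fun cur f =>
      (if f.contains 'x' then
        match PySem.List.index? f 'x' with
        | some index => if PySem.List.pyGetD s (index : Int) ' ' = n then cur ++ [f ++ ['x']] else cur
        | none => cur
      else cur ++ [f ++ ['x']]) ++ [f ++ [n]])
    []

theorem toDigits_ne_x (n : Nat) : ∀ c ∈ Nat.toDigits 10 n, c ≠ 'x' := by
  induction n using Nat.strong_induction_on with
  | _ n ih =>
    rw [Nat.toDigits_eq_if (by norm_num)]
    split
    · intro c hc
      simp only [List.mem_singleton] at hc
      subst hc
      interval_cases n <;> decide
    · intro c hc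
      rw [List.mem_append] at hc
      rcases hc with hc | hc
      · exact ih (n / 10) (Nat.div_lt_self (by omega) (by norm_num)) c hc
      · simp only [List.mem_singleton] at hc
        subst hc
        have h10 : n % 10 < 10 := Nat.mod_lt _ (by norm_num)
        interval_cases h : (n % 10) <;> simp_all <;> decide

theorem nox_toChars (num : Int) : ∀ c ∈ PySem.Int.toChars num, c ≠ 'x' := by
  intro c hc
  unfold PySem.Int.toChars at hc
  split at hc
  · rcases List.mem_cons.mp hc with h | h
    · subst h; decide
    · exact toDigits_ne_x _ c h
  · exact toDigits_ne_x _ c hc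

theorem getD_ne_x {s : List Char} (hs : ∀ c ∈ s, c ≠ 'x') (i : Nat) : s.getD i ' ' ≠ 'x' := by
  by_cases h : i < s.length
  · rw [List.getD_eq_getElem s ' ' h]
    exact hs _ (List.getElem_mem h)
  · rw [List.getD_eq_default s ' ' (by omega)]
    decide

theorem len2_toChars (num : Int) (h : Pre_prime_fams num) : 2 ≤ (PySem.Int.toChars num).length := by
  unfold Pre_prime_fams at h
  unfold PySem.Int.toChars
  split
  · rename_i hneg
    have : Nat.toDigits 10 num.natAbs ≠ [] := by
      rw [Nat.toDigits_eq_if (by norm_num)]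
      split <;> simp
    simp only [List.length_cons]
    have := List.length_pos_iff.mpr this
    omega
  · rename_i hpos
    have h10 : 10 ≤ num := by omega
    have : ¬ ((Nat.toDigits 10 num.toNat).length ≤ 1) := by
      rw [Nat.length_toDigits_le_iff (by norm_num) (by norm_num)]
      omega
    omega

theorem range_double (n : Nat) :
    List.range (2 * n) = (List.range n).flatMap (fun v => [2 * v, 2 * v + 1]) := by
  induction n with
  | zero => simp
  | succ n ih =>
    have : 2 * (n + 1) = (2 * n + 1) + 1 := by omega
    rw [this, List.range_succ, show 2*n+1 = (2*n)+1 from rfl, List.range_succ, List.range_succ,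
      List.flatMap_append, ← ih]
    simp

theorem bit_lt {b i k : Nat} (hb : b < 2) (hi : i < k) (v : Nat) :
    pfBit (k + 1) (2 * v + b) i = pfBit k v i := by
  unfold pfBit
  have h1 : k + 1 - 1 - i = (k - 1 - i) + 1 := by omega
  rw [h1, pow_succ]
  have h2 : (2 * v + b) / (2 ^ (k - 1 - i) * 2) = v / 2 ^ (k - 1 - i) := by
    rw [mul_comm (2 ^ (k - 1 - i)) 2, ← Nat.div_div_eq_div_mul]
    congr 1
    omega
  rw [h2]

theorem bit_last {b : Nat} (hb : b < 2) (k v : Nat) : pfBit (k + 1) (2 * v + b) k = b := by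
  unfold pfBit
  have : k + 1 - 1 - k = 0 := by omega
  rw [this]
  simp
  omega

theorem masked_step {b : Nat} (hb : b < 2) (k v : Nat) :
    pfMasked (k + 1) (2 * v + b) = pfMasked k v ++ (if b = 0 then [k] else []) := by
  unfold pfMasked
  rw [List.range_succ, List.filter_append]
  congr 1
  · exact List.filter_congr (fun i hi => by
      rw [bit_lt hb (List.mem_range.mp hi)])
  · rw [List.filter_cons]
    simp only [List.filter_nil]
    rw [bit_last hb]
    split_ifs with h1 h2 h2 <;> simp_all

theorem patt_step0 (s : List Char) (k v : Nat) :
    pfPatt s (k + 1) (2 * v) = pfPatt s k v ++ ['x'] := by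
  unfold pfPatt
  rw [List.range_succ, List.map_append]
  congr 1
  · exact List.map_congr_left (fun i hi => by
      rw [show 2*v = 2*v+0 from rfl, bit_lt (by omega) (List.mem_range.mp hi)])
  · simp only [List.map_cons, List.map_nil]
    rw [show 2*v = 2*v+0 from rfl, bit_last (by omega)]
    simp

theorem patt_step1 (s : List Char) (k v : Nat) :
    pfPatt s (k + 1) (2 * v + 1) = pfPatt s k v ++ [s.getD k ' '] := by
  unfold pfPatt
  rw [List.range_succ, List.map_append]
  congr 1
  · exact List.map_congr_left (fun i hi => by
      rw [bit_lt (by omega) (List.mem_range.mp hi)])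
  · simp only [List.map_cons, List.map_nil]
    rw [bit_last (by omega)]
    simp

theorem ok_step1 (s : List Char) (k v : Nat) : pfOk s (k + 1) (2 * v + 1) = pfOk s k v := by
  unfold pfOk
  rw [masked_step (by omega) k v]
  simp

theorem ok_step0 (s : List Char) (k v : Nat) :
    pfOk s (k + 1) (2 * v) =
      (pfOk s k v && ((pfMasked k v).isEmpty ||
        (s.getD k ' ' == s.getD ((pfMasked k v).headD 0) ' '))) := by
  unfold pfOk
  rw [show 2*v = 2*v+0 from rfl, masked_step (by omega) k v]
  cases hm : pfMasked k v with
  | nil => simp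
  | cons j0 rest =>
    simp [List.all_append, List.headD]

theorem mem_x_patt {s : List Char} (hs : ∀ c ∈ s, c ≠ 'x') (k v : Nat) :
    'x' ∈ pfPatt s k v ↔ pfMasked k v ≠ [] := by
  unfold pfPatt pfMasked
  rw [List.mem_map]
  constructor
  · rintro ⟨i, hi, hx⟩
    intro hnil
    by_cases hb : pfBit k v i == 0
    · have : i ∈ List.filter (fun i => pfBit k v i == 0) (List.range k) := by
        rw [List.mem_filter]; exact ⟨hi, hb⟩
      simp [hnil] at this
    · rw [if_neg hb] at hx
      exact getD_ne_x hs i hx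
  · intro hne
    rcases List.exists_mem_of_ne_nil _ hne with ⟨i, hi⟩
    rw [List.mem_filter] at hi
    exact ⟨i, hi.1, by rw [if_pos hi.2]⟩

theorem index_x_patt {s : List Char} (hs : ∀ c ∈ s, c ≠ 'x') (k v : Nat) :
    PySem.List.index? (pfPatt s k v) 'x' = (pfMasked k v).head? := by
  cases hm : pfMasked k v with
  | nil =>
    rw [List.head?_nil, PySem.List.index?_eq_none_iff]
    rw [mem_x_patt hs k v, hm]
    simp
  | cons j0 rest =>
    rw [List.head?_cons]
    unfold pfMasked at hm
    rw [List.filter_eq_cons_iff] at hm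
    rcases hm with ⟨l₁, l₂, hsplit, hnotp, hp, _⟩
    have hj0 : j0 = l₁.length := by
      have h1 : (List.range k)[l₁.length]? = some j0 := by
        rw [hsplit]; simp
      have h2 : l₁.length < k := by
        rcases List.getElem?_eq_some_iff.mp h1 with ⟨h, _⟩
        simpa using h
      rw [List.getElem?_range h2] at h1
      exact (Option.some_inj.mp h1).symm
    refine (PySem.List.index?_eq_some_iff _ _ _).mpr
      ⟨(l₁.map (fun i => if pfBit k v i == 0 then 'x' else s.getD i ' ')),
       (l₂.map (fun i => if pfBit k v i == 0 then 'x' else s.getD i ' ')), ?_, ?_, ?_⟩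
    · unfold pfPatt
      rw [hsplit, List.map_append, List.map_cons, if_pos hp]
    · simpa using hj0.symm
    · intro hmem
      rcases List.mem_map.mp hmem with ⟨i, hi, hfi⟩
      have := hnotp i hi
      rw [if_neg (by simpa using this)] at hfi
      exact getD_ne_x hs i hfi

theorem form_one (s : List Char) : pfForm s 1 = [['x'], [s.getD 0 ' ']] := by
  simp [pfForm, pfOk, pfMasked, pfBit, pfPatt, List.range_succ]

theorem flatMap_filter {α β : Type} (p : α → Bool) (g : α → List β) (l : List α) :
    (l.filter p).flatMap g = l.flatMap (fun v => if p v then g v else []) := by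
  induction l with
  | nil => simp
  | cons a t ih =>
    rw [List.filter_cons]
    by_cases h : p a <;> simp [h, ih]

theorem flatMap_congr_mem {α β : Type} {f g : α → List β} (l : List α)
    (h : ∀ a ∈ l, f a = g a) : l.flatMap f = l.flatMap g := by
  induction l with
  | nil => simp
  | cons a t ih =>
    simp only [List.flatMap_cons]
    rw [h a (List.mem_cons_self), ih (fun a ha => h a (List.mem_cons_of_mem _ ha))]

theorem filter_map_flatMap {α β γ : Type} (p : β → Bool) (q : β → γ) (g : α → List β) (l : List α) :
    ((l.flatMap g).filter p).map q = l.flatMap (fun a => ((g a).filter p).map q) := by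
  induction l with
  | nil => simp
  | cons a t ih =>
    simp [List.filter_append, List.map_append, ih]

theorem step_main {s : List Char} (hs : ∀ c ∈ s, c ≠ 'x') (k : Nat) :
    pfStep s (pfForm s k) (s.getD k ' ') = pfForm s (k + 1) := by
  unfold pfStep
  refine Eq.trans (PySem.List.foldl_congr_mem _ _
    (fun cur f => cur ++
      ((if f.contains 'x' then
          match PySem.List.index? f 'x' with
          | some index => if PySem.List.pyGetD s (index : Int) ' ' = s.getD k ' ' then [f ++ ['x']] else []
          | none => []
        else [f ++ ['x']]) ++ [f ++ [s.getD k ' ']])) _ ?_) ?_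
  case _ =>
    intro acc f _
    by_cases hc : f.contains 'x' <;>
      simp only [hc, if_true, Bool.false_eq_true, if_false] <;>
      (try split) <;> (try split_ifs) <;> simp [List.append_assoc]
  rw [PySem.List.foldl_append_eq_flatMap, List.nil_append]
  have h2 : 2 ^ (k + 1) = 2 * 2 ^ k := by rw [pow_succ]; ring
  conv_rhs => rw [pfForm, h2, range_double, filter_map_flatMap]
  rw [pfForm, List.flatMap_map, flatMap_filter]
  apply flatMap_congr_mem
  intro v _
  by_cases hok : pfOk s k v = true
  · rw [if_pos hok]
    cases hm : pfMasked k v with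
    | nil =>
      have hxm : (pfPatt s k v).contains 'x' = false := by
        rw [Bool.eq_false_iff]
        intro hcon
        have := List.contains_iff_mem.mp hcon
        rw [mem_x_patt hs k v, hm] at this
        exact this rfl
      have hok0 : pfOk s (k + 1) (2 * v) = true := by
        rw [ok_step0, hok, hm]
        simp
      have hok1 : pfOk s (k + 1) (2 * v + 1) = true := by rw [ok_step1]; exact hok
      simp only [hxm, Bool.false_eq_true, if_false]
      rw [List.filter_cons, List.filter_cons]
      simp only [hok0, hok1, if_true, List.filter_nil, List.map_cons, List.map_nil]
      rw [patt_step0, patt_step1]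
      simp
    | cons j0 rest =>
      have hxm : (pfPatt s k v).contains 'x' = true := by
        rw [List.contains_iff_mem, mem_x_patt hs k v, hm]
        simp
      have hidx : PySem.List.index? (pfPatt s k v) 'x' = some j0 := by
        rw [index_x_patt hs k v, hm, List.head?_cons]
      have hok1 : pfOk s (k + 1) (2 * v + 1) = true := by rw [ok_step1]; exact hok
      have hok0 : pfOk s (k + 1) (2 * v) = (s.getD k ' ' == s.getD j0 ' ') := by
        rw [ok_step0, hok, hm]
        simp
      simp only [hxm, if_true, hidx, PySem.List.pyGetD_natCast]
      rw [List.filter_cons, List.filter_cons]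
      simp only [hok1, if_true, List.filter_nil]
      by_cases heq : s.getD j0 ' ' = s.getD k ' '
      · rw [if_pos (by simpa using heq)]
        have hT : pfOk s (k + 1) (2 * v) = true := by
          rw [hok0, heq]
          simp
        simp only [hT, if_true, List.map_cons, List.map_nil]
        rw [patt_step0, patt_step1]
        simp
      · rw [if_neg (by simpa using heq)]
        have hF : pfOk s (k + 1) (2 * v) = false := by
          rw [hok0]
          simp only [beq_eq_false_iff_ne, ne_eq]
          exact fun h => heq h.symm
        simp only [hF, Bool.false_eq_true, if_false, List.map_cons, List.map_nil]
        rw [patt_step1]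
        simp
  · rw [if_neg hok]
    have hokf : pfOk s k v = false := by simpa using hok
    have hok0 : pfOk s (k + 1) (2 * v) = false := by
      rw [ok_step0, hokf]
      simp
    have hok1 : pfOk s (k + 1) (2 * v + 1) = false := by rw [ok_step1]; exact hokf
    rw [List.filter_cons, List.filter_cons]
    simp [hok0, hok1]

theorem fold_mid {s : List Char} (hs : ∀ c ∈ s, c ≠ 'x') :
    ∀ (l : List Char) (k : Nat), (∀ j (hj : j < l.length), l[j] = s.getD (k + j) ' ') →
      l.foldl (pfStep s) (pfForm s k) = pfForm s (k + l.length) := by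
  intro l
  induction l with
  | nil => intro k _; simp
  | cons c t ih =>
    intro k h
    have hc : c = s.getD k ' ' := by simpa using h 0 (by simp)
    simp only [List.foldl_cons, List.length_cons]
    rw [hc, step_main hs k]
    rw [ih (k + 1) (fun j hj => by
      have := h (j + 1) (by simpa using Nat.succ_lt_succ hj)
      simpa [Nat.add_assoc, Nat.add_comm 1 j] using this)]
    congr 1
    omega

theorem masked_allones (m : Nat) : pfMasked m (2 ^ m - 1) = [] := by
  unfold pfMasked
  rw [List.filter_eq_nil_iff]
  intro i hi
  rw [List.mem_range] at hi
  unfold pfBit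
  set e := m - 1 - i with he
  have hem : e < m := by omega
  have key : (2 ^ m - 1) / 2 ^ e = 2 ^ (m - e) - 1 := by
    have hA : 0 < 2 ^ e := Nat.two_pow_pos _
    have hB : 0 < 2 ^ (m - e) := Nat.two_pow_pos _
    have hAB : 2 ^ e * 2 ^ (m - e) = 2 ^ m := by
      rw [← pow_add]; congr 1; omega
    have hle : 2 ^ e ≤ 2 ^ m := Nat.pow_le_pow_right (by norm_num) (by omega)
    have h1 : 2 ^ m - 1 = 2 ^ e * (2 ^ (m - e) - 1) + (2 ^ e - 1) := by
      rw [Nat.mul_sub, mul_one, hAB]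
      omega
    rw [h1, Nat.mul_add_div hA, Nat.div_eq_of_lt (by omega), Nat.add_zero]
  rw [key]
  have hsplit : 2 ^ (m - e) = 2 * 2 ^ (m - e - 1) := by
    rw [← pow_succ']
    congr 1
    omega
  have hq : 1 ≤ 2 ^ (m - e - 1) := Nat.one_le_two_pow
  simp only [hsplit]
  simp only [beq_iff_eq]
  omega

theorem form_split (s : List Char) (m : Nat) :
    pfForm s m = ((List.range (2 ^ m - 1)).filter (pfOk s m)).map (pfPatt s m)
      ++ [pfPatt s m (2 ^ m - 1)] := by
  unfold pfForm
  have h1 : 2 ^ m = (2 ^ m - 1) + 1 := by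
    have : (1:Nat) ≤ 2 ^ m := Nat.one_le_two_pow
    omega
  conv_lhs => rw [h1, List.range_succ]
  rw [List.filter_append, List.map_append]
  congr 1
  rw [List.filter_cons]
  have hok : pfOk s m (2 ^ m - 1) = true := by
    unfold pfOk
    rw [masked_allones]
    simp
  simp [hok]

theorem int_bit (w e : Nat) :
    PySem.Int.mod (PySem.Int.floordiv ((w : Nat) : Int) ((2:Int) ^ e)) 2
      = ((w / 2 ^ e % 2 : Nat) : Int) := by
  unfold PySem.Int.mod PySem.Int.floordiv
  rw [Int.fdiv_eq_ediv, if_pos (Or.inl (by positivity)), Int.fmod_eq_emod, if_pos (Or.inl (by norm_num))]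
  push_cast
  ring_nf

-- ===== VERDICT (by name: the statement is the Claim_ definition above) =====
theorem castbeq_zero (x : Nat) : (((x : Nat) : Int) == 0) = (x == 0) := by
  rw [Bool.eq_iff_iff]
  simp

theorem slice_mid {s : List Char} (h : 2 ≤ s.length) :
    PySem.List.slice s (some 1) (some (-1)) = s.tail.dropLast := by
  have h1 : PySem.List.clampIdx s.length 1 = 1 := by
    unfold PySem.List.clampIdx
    rw [if_neg (by norm_num)]
    have h1' : (1:Int).toNat = 1 := rfl
    rw [h1']
    omega
  have h2 : PySem.List.clampIdx s.length (-1) = s.length - 1 := by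
    unfold PySem.List.clampIdx
    rw [if_pos (by norm_num), if_neg (by omega)]
    omega
  show List.take (PySem.List.clampIdx s.length (-1) - PySem.List.clampIdx s.length 1)
    (List.drop (PySem.List.clampIdx s.length 1) s) = s.tail.dropLast
  rw [h1, h2]
  rw [List.dropLast_eq_take, ← List.drop_one, List.length_drop]

theorem prime_fams_spec : Claim_equal_prime_fams := by
  unfold Claim_equal_prime_fams
  intro num _hdom hpre
  unfold Spec_prime_fams
  have hlen : 2 ≤ (PySem.Int.toChars num).length := len2_toChars num hpre
  have hnox : ∀ c ∈ PySem.Int.toChars num, c ≠ 'x' := nox_toChars num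
  simp only [prime_fams, prime_fams_alt]
  set s := PySem.Int.toChars num with hsdef
  set m := s.length - 1 with hm
  have hsne : s ≠ [] := by intro h; rw [h] at hlen; simp at hlen
  have hlast : PySem.List.pyGetD s (-1) ' ' = s.getD m ' ' := by
    rw [PySem.List.pyGetD_neg_one s ' ' hsne, List.getLast_eq_getElem,
      List.getD_eq_getElem s ' ' (show m < s.length by omega)]
  -- ===== A side =====
  rw [if_pos (show 1 < s.length by omega)]
  rw [slice_mid hlen]
  rw [PySem.List.pyGetD_zero]
  rw [show ([['x'], [s.getD 0 ' ']] : List (List Char)) = pfForm s 1 from (form_one s).symm]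
  rw [show (fun (fams : List (List Char)) (n : Char) =>
        fams.foldl
          (fun cur f =>
            (if f.contains 'x' then
              match PySem.List.index? f 'x' with
              | some index => if PySem.List.pyGetD s (index : Int) ' ' = n then cur ++ [f ++ ['x']] else cur
              | none => cur
            else cur ++ [f ++ ['x']]) ++ [f ++ [n]])
          []) = pfStep s from rfl]
  rw [fold_mid hnox s.tail.dropLast 1 (by
    intro j hj
    have hjl : j < s.length - 2 := by
      simpa [List.length_dropLast, List.length_tail] using hj
    rw [List.getElem_dropLast, List.getElem_tail,
      List.getD_eq_getElem s ' ' (by omega)]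
    congr 1
    omega)]
  have hform : pfForm s (1 + s.tail.dropLast.length) = pfForm s m := by
    congr 1
    simp [List.length_dropLast, List.length_tail]
    omega
  rw [hform]
  rw [PySem.List.slice_to_neg_one, form_split s m, List.dropLast_concat, hlast]
  rw [List.map_map]
  -- ===== B side =====
  rw [if_neg (show ¬ m = 0 by omega)]
  have hrange : PySem.List.pyRange 0 ((2:Int) ^ m - 1) 1
      = (List.range (2 ^ m - 1)).map (fun (w : Nat) => (w : Int)) := by
    rw [PySem.List.pyRange_one]
    have h2m : ((2:Int) ^ m) = ((2 ^ m : Nat) : Int) := by push_cast; ring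
    have ht : (((2:Int) ^ m - 1) - 0).toNat = 2 ^ m - 1 := by
      rw [h2m]
      omega
    rw [ht]
    apply List.map_congr_left
    intro a _
    omega
  rw [hrange, List.foldl_map]
  have hmask : ∀ w : Nat, (List.range m).filter
      (fun i => PySem.Int.mod (PySem.Int.floordiv ((w : Nat) : Int) ((2:Int) ^ (m - 1 - i))) 2 == 0)
      = pfMasked m w := by
    intro w
    unfold pfMasked
    apply List.filter_congr
    intro i _
    rw [int_bit w (m - 1 - i), castbeq_zero]
    rfl
  have hB : List.foldl
      (fun (out : List String) (w : Nat) =>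
        if ((List.range m).filter
              (fun i => PySem.Int.mod (PySem.Int.floordiv ((w : Nat) : Int) ((2:Int) ^ (m - 1 - i))) 2 == 0)).all
            (fun i => PySem.List.pyGetD s ((i : Nat) : Int) ' ' ==
              PySem.List.pyGetD s
                ((((List.range m).filter
                    (fun i => PySem.Int.mod (PySem.Int.floordiv ((w : Nat) : Int) ((2:Int) ^ (m - 1 - i))) 2 == 0)).headD 0 : Nat) : Int) ' ')
        then out ++ [String.ofList
              (((List.range m).map (fun i =>
                 if ((List.range m).filter
                      (fun i => PySem.Int.mod (PySem.Int.floordiv ((w : Nat) : Int) ((2:Int) ^ (m - 1 - i))) 2 == 0)).contains i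
                 then 'x' else PySem.List.pyGetD s ((i : Nat) : Int) ' '))
               ++ [s.getD m ' '])]
        else out)
      [] (List.range (2 ^ m - 1))
    = ((List.range (2 ^ m - 1)).filter (pfOk s m)).map
        (fun w => String.ofList (pfPatt s m w ++ [s.getD m ' '])) := by
    refine Eq.trans (PySem.List.foldl_congr_mem _ _
      (fun out w => if pfOk s m w then out ++ [String.ofList (pfPatt s m w ++ [s.getD m ' '])] else out)
      [] ?_) ?_
    · intro out w _
      simp only [hmask w, PySem.List.pyGetD_natCast]
      have hcond : (pfMasked m w).all
          (fun i => s.getD i ' ' == s.getD ((pfMasked m w).headD 0) ' ') = pfOk s m w := rfl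
      rw [hcond]
      have hpatt : (List.range m).map
          (fun i => if (pfMasked m w).contains i then 'x' else s.getD i ' ') = pfPatt s m w := by
        apply List.map_congr_left
        intro i hi
        have hco : (pfMasked m w).contains i = (pfBit m w i == 0) := by
          rw [Bool.eq_iff_iff, List.contains_iff_mem]
          unfold pfMasked
          simp [List.mem_filter, List.mem_range.mp hi]
        rw [hco]
      rw [hpatt]
    · rw [PySem.List.foldl_append_if (pfOk s m)
        (fun w => String.ofList (pfPatt s m w ++ [s.getD m ' '])), List.nil_append]
  rw [hB]
  rfl
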